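-- pv_equiv track=rewrite | github.com/RATHOD-SHUBHAM/DataStructure-And-Algorithm | Striver/Arrays/Easy/Third Largest Number/Third largest Non Distinct Elements/sol.py | thirdDistinctLargest
-- ===== SOURCE A (Python) =====
-- def thirdDistinctLargest(arr):
--     first = second = third = None
--
--     for x in arr:
--         if first is None or x > first:
--             third = second
--             second = first
--             first = x
--         elif x == first:
--             continue
--
--         elif second is None or x > second:
--             third = second
--             second = x
--         elif x == second:
--             continue
--
--         elif third is None or x > third:
--             third = x
--
--     return third if third is not None else -1
-- ===== SOURCE B (Python) =====
-- def thirdDistinctLargest(arr):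
--     distinct = sorted(set(arr), reverse=True)
--     return distinct[2] if len(distinct) >= 3 else -1
-- ===== Notes on version B (the rewrite author's own statement) =====
-- stated objective: simpler
-- what changed: Replaces the single-pass first/second/third tracking state machine by dedup-then-sort: sorted(set(arr), reverse=True) and index 2 (or -1).
import Mathlib
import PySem

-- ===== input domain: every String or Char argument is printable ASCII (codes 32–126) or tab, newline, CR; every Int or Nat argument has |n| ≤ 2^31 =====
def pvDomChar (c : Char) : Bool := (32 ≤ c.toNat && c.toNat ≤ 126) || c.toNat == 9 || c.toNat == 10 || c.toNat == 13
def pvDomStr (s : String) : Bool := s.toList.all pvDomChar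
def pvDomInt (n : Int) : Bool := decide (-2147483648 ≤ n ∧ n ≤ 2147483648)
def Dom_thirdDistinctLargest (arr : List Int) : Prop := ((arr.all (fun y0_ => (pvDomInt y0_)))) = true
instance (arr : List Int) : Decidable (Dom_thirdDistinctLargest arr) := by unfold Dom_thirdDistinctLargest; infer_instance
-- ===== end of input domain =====

-- B replaces A's one-pass first/second/third tracking by dedup-then-sort-descending and index 2 (simpler).

-- ===== PORT A =====
-- A's loop body: the running state (first, second, third), each Option Int (None = Python None).
def pvStepA (st : Option Int × Option Int × Option Int) (x : Int) :
    Option Int × Option Int × Option Int :=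
  match st with
  | (f, s, t) =>
    if (match f with | none => true | some a => decide (x > a)) then (some x, f, s)
    else if f = some x then (f, s, t)
    else if (match s with | none => true | some b => decide (x > b)) then (f, some x, s)
    else if s = some x then (f, s, t)
    else if (match t with | none => true | some c => decide (x > c)) then (f, s, some x)
    else (f, s, t)

def thirdDistinctLargest (arr : List Int) : Int :=
  match (arr.foldl pvStepA (none, none, none)).2.2 with
  | some v => v
  | none => -1

-- ===== PORT B =====
def thirdDistinctLargest_alt (arr : List Int) : Int :=
  let distinct := PySem.List.sorted (PySem.Set.ofList arr) (fun x => x) true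
  if 3 ≤ distinct.length then (PySem.List.pyGet? distinct 2).getD (-1) else -1

-- ===== PRECONDITION & SPEC =====
def Spec_thirdDistinctLargest (arr : List Int) (out : Int) : Prop := out = thirdDistinctLargest_alt arr
instance (arr : List Int) (out : Int) : Decidable (Spec_thirdDistinctLargest arr out) := by unfold Spec_thirdDistinctLargest; infer_instance

-- ===== CLAIM (what is proved, stated in full; the proofs are below) =====
def Claim_equal_thirdDistinctLargest : Prop := ∀ (arr : List Int), Dom_thirdDistinctLargest arr → Spec_thirdDistinctLargest arr (thirdDistinctLargest arr)

-- ===== LEMMAS AND PROOFS =====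

-- insert x into a strictly-decreasing duplicate-free list, keeping it so
def sdIns (x : Int) : List Int → List Int
  | [] => [x]
  | a :: t => if x > a then x :: a :: t else if x = a then a :: t else a :: sdIns x t

def sdFold (arr : List Int) (l : List Int) : List Int :=
  arr.foldl (fun acc x => sdIns x acc) l

-- the encoding of (a prefix of) the sorted-descending distinct list as A's triple state
def enc : List Int → Option Int × Option Int × Option Int
  | [] => (none, none, none)
  | [a] => (some a, none, none)
  | [a, b] => (some a, some b, none)
  | a :: b :: c :: _ => (some a, some b, some c)

lemma mem_sdIns (x y : Int) (l : List Int) (h : y ∈ sdIns x l) : y = x ∨ y ∈ l := by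
  induction l with
  | nil => simp [sdIns] at h; tauto
  | cons a t ih =>
    simp only [sdIns] at h
    split_ifs at h with h1 h2
    · rcases List.mem_cons.mp h with rfl | h <;> tauto
    · tauto
    · rcases List.mem_cons.mp h with rfl | h
      · right; simp
      · rcases ih h with rfl | h <;> simp [h]

lemma sdIns_pairwise (x : Int) (l : List Int) (h : l.Pairwise (· > ·)) :
    (sdIns x l).Pairwise (· > ·) := by
  induction l with
  | nil => simp [sdIns]
  | cons a t ih =>
    rw [List.pairwise_cons] at h
    obtain ⟨ha, ht⟩ := h
    simp only [sdIns]
    split_ifs with h1 h2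
    · exact List.Pairwise.cons (by
        intro y hy
        rcases List.mem_cons.mp hy with rfl | hy
        · omega
        · have := ha y hy; omega) (List.Pairwise.cons ha ht)
    · exact List.Pairwise.cons ha ht
    · refine List.Pairwise.cons ?_ (ih ht)
      intro y hy
      rcases mem_sdIns x y t hy with rfl | hy
      · omega
      · exact ha y hy

lemma sdIns_perm (x : Int) (l : List Int) (h : l.Pairwise (· > ·)) :
    (sdIns x l).Perm (if x ∈ l then l else x :: l) := by
  induction l with
  | nil => simp [sdIns]
  | cons a t ih =>
    rw [List.pairwise_cons] at h
    obtain ⟨ha, ht⟩ := h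
    by_cases h1 : x > a
    · have hnm : x ∉ a :: t := by
        intro hm
        rcases List.mem_cons.mp hm with rfl | hm
        · omega
        · have := ha x hm; omega
      rw [if_neg hnm]
      simp [sdIns, h1]
    · by_cases h2 : x = a
      · subst h2
        rw [if_pos (by simp)]
        simp [sdIns]
      · simp only [sdIns, if_neg h1, if_neg h2]
        by_cases hm : x ∈ t
        · rw [if_pos (List.mem_cons_of_mem _ hm)]
          simp only [hm, if_true] at ih
          exact List.Perm.cons a (ih ht)
        · rw [if_neg (by simp [h2, hm])]
          simp only [hm, if_false] at ih
          exact (List.Perm.cons a (ih ht)).trans (List.Perm.swap x a t)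

lemma sdFold_perm (arr : List Int) (l s : List Int) (h : l.Perm s) (hpl : l.Pairwise (· > ·)) :
    (sdFold arr l).Perm (arr.foldl PySem.Set.add s) := by
  induction arr generalizing l s with
  | nil => simpa [sdFold]
  | cons x rest ih =>
    simp only [sdFold, List.foldl_cons]
    refine ih _ _ ?_ (sdIns_pairwise x l hpl)
    have hmem : x ∈ l ↔ x ∈ s := ⟨fun hx => h.mem_iff.mp hx, fun hx => h.mem_iff.mpr hx⟩
    have hp := sdIns_perm x l hpl
    by_cases hx : x ∈ s
    · have hxl : x ∈ l := hmem.mpr hx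
      simp [hxl] at hp
      have : PySem.Set.add s x = s := by
        simp [PySem.Set.add, PySem.Set.contains, hx]
      rw [this]
      exact hp.trans h
    · have hxl : x ∉ l := fun c => hx (hmem.mp c)
      simp [hxl] at hp
      have : PySem.Set.add s x = s ++ [x] := by
        simp [PySem.Set.add, PySem.Set.contains, hx]
      rw [this]
      exact (hp.trans (h.cons x)).trans (List.perm_append_singleton x s).symm

lemma sdFold_pairwise (arr : List Int) (l : List Int) (h : l.Pairwise (· > ·)) :
    (sdFold arr l).Pairwise (· > ·) := by
  induction arr generalizing l with
  | nil => simpa [sdFold]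
  | cons x rest ih => exact ih _ (sdIns_pairwise x l h)

-- one step of A's loop agrees with sdIns under the take-3 encoding
lemma step_key (x : Int) (l : List Int) (h : l.Pairwise (· > ·)) :
    pvStepA (enc (l.take 3)) x = enc ((sdIns x l).take 3) := by
  rcases l with _ | ⟨a, _ | ⟨b, _ | ⟨c, rest⟩⟩⟩
  · simp [pvStepA, sdIns, enc]
  · by_cases h1 : x > a
    · simp [pvStepA, sdIns, enc, h1]
    · by_cases h2 : x = a
      · subst h2; simp [pvStepA, sdIns, enc]
      · have h2' : ¬ (a = x) := fun e => h2 e.symm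
        simp [pvStepA, sdIns, enc, h1, h2, h2']
  · have hab : a > b := by
      rw [List.pairwise_cons] at h; exact h.1 b (by simp)
    by_cases h1 : x > a
    · simp [pvStepA, sdIns, enc, h1]
    · by_cases h2 : x = a
      · subst h2; simp [pvStepA, sdIns, enc]
      · have h2' : ¬ (a = x) := fun e => h2 e.symm
        by_cases h3 : x > b
        · simp [pvStepA, sdIns, enc, h1, h2, h2', h3]
        · by_cases h4 : x = b
          · subst h4; simp [pvStepA, sdIns, enc, h1, h2']
          · have h4' : ¬ (b = x) := fun e => h4 e.symm
            simp [pvStepA, sdIns, enc, h1, h2, h2', h3, h4, h4']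
  · have hab : a > b := by
      rw [List.pairwise_cons] at h; exact h.1 b (by simp)
    have hbc : b > c := by
      rw [List.pairwise_cons, List.pairwise_cons] at h; exact h.2.1 c (by simp)
    by_cases h1 : x > a
    · simp [pvStepA, sdIns, enc, h1]
    · by_cases h2 : x = a
      · subst h2; simp [pvStepA, sdIns, enc]
      · have h2' : ¬ (a = x) := fun e => h2 e.symm
        by_cases h3 : x > b
        · simp [pvStepA, sdIns, enc, h1, h2, h2', h3]
        · by_cases h4 : x = b
          · subst h4; simp [pvStepA, sdIns, enc, h1, h2']
          · have h4' : ¬ (b = x) := fun e => h4 e.symm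
            by_cases h5 : x > c
            · simp [pvStepA, sdIns, enc, h1, h2, h2', h3, h4, h4', h5]
            · by_cases h6 : x = c
              · subst h6; simp [pvStepA, sdIns, enc, h1, h2', h3, h4']
              · have h6' : ¬ (c = x) := fun e => h6 e.symm
                simp [pvStepA, sdIns, enc, h1, h2, h2', h3, h4, h4', h5, h6]

lemma fold_key (arr : List Int) (l : List Int) (h : l.Pairwise (· > ·)) :
    arr.foldl pvStepA (enc (l.take 3)) = enc ((sdFold arr l).take 3) := by
  induction arr generalizing l with
  | nil => simp [sdFold]
  | cons x rest ih =>
    simp only [List.foldl_cons, sdFold]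
    rw [step_key x l h]
    exact ih _ (sdIns_pairwise x l h)

-- ===== VERDICT (by name: the statement is the Claim_ definition above) =====
theorem thirdDistinctLargest_spec : Claim_equal_thirdDistinctLargest := by
  intro arr _
  unfold Spec_thirdDistinctLargest thirdDistinctLargest thirdDistinctLargest_alt
  have hD : PySem.List.sorted (PySem.Set.ofList arr) (fun x => x) true = sdFold arr [] := by
    apply PySem.List.sorted_rev_eq_of_perm_of_pairwise_gt
    · exact sdFold_perm arr [] [] (List.Perm.refl _) (by simp) |>.trans (by rw [PySem.Set.ofList_eq_foldl])
    · exact sdFold_pairwise arr [] (by simp)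
  have henc : arr.foldl pvStepA (none, none, none) = enc ((sdFold arr []).take 3) := by
    have := fold_key arr [] (by simp)
    simpa [enc] using this
  rw [hD, henc]
  rcases hshape : sdFold arr [] with _ | ⟨a, _ | ⟨b, _ | ⟨c, rest⟩⟩⟩ <;>
    simp [enc, PySem.List.pyGet?, PySem.List.pyIdx?]
  rw [if_pos (by omega)]
  simp
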